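-- pv_equiv track=rewrite | github.com/SANJAIB2004/DSA_python | Practice/stringvaluesrighttoleft.py | process_strings
-- ===== SOURCE A (Python) =====
-- def process_strings(strings):
--     result = ""
--     max_len = max(len(s) for s in strings)  # Find the longest string
--
--     # Iterate from rightmost character to leftmost
--     for i in range(1, max_len + 1):
--         for s in strings:
--             if len(s) >= i:  # Check if string has this character from right
--                 result += s[-i]
--     return result
-- ===== SOURCE B (Python) =====
-- def process_strings(strings):
--     # Transpose-of-reversed-strings: peel one column (the rightmost remaining
--     # characters) off per round instead of indexing from the right.
--     rows = [list(s[::-1]) for s in strings]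
--     out = []
--     while any(rows):
--         out.extend(r[0] for r in rows if r)
--         rows = [r[1:] for r in rows]
--     return ''.join(out)
-- ===== Notes on version B (the rewrite author's own statement) =====
-- stated objective: alternative
-- what changed: Replaces A's outer right-offset index loop (max length, range(1,max+1), s[-i] with a length guard) by reversing every string and peeling the transposed columns off head-first in a while-any loop.
import Mathlib
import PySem

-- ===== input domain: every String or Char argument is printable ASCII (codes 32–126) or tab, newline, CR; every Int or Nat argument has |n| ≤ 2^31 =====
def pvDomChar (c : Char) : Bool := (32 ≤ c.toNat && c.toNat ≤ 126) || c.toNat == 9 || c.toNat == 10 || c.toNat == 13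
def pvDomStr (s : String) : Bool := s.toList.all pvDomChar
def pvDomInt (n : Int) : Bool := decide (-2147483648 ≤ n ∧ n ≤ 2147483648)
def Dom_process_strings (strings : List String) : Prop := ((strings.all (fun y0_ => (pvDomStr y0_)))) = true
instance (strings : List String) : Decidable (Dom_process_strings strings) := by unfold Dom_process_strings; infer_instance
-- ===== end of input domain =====

-- B changes the algorithm: instead of A's right-offset index loop with a max-length bound,
-- it reverses each string and peels the transposed columns off head-first (alternative, not faster).

-- ===== PORT A =====
-- result is accumulated as a List Char (kernel-transparent) and wrapped with String.ofList at the end;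
-- under the guard len s ≥ i (with i ≥ 1) s[-i] is in range, so pyGet? is some and Option.toList appends that char.
def process_strings (strings : List String) : String :=
  match PySem.List.max? (strings.map (fun s => (s.toList.length : Int))) (fun x => x) with
  | none => ""   -- Python raises ValueError here (empty sequence); excluded by Pre_
  | some max_len =>
      String.ofList ((PySem.List.pyRange 1 (max_len + 1) 1).foldl (fun result i =>
        strings.foldl (fun result s =>
          if (s.toList.length : Int) ≥ i then
            result ++ (PySem.List.pyGet? s.toList (-i)).toList
          else result) result) [])

-- ===== PORT B =====
-- termination helper for the while-loop: peeling the head off every nonempty row shrinks the total size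
theorem pvTailsSum_le (rows : List (List Char)) :
    ((rows.map List.tail).map List.length).sum ≤ (rows.map List.length).sum := by
  induction rows with
  | nil => simp
  | cons x xs ih =>
      simp only [List.map_cons, List.sum_cons]
      have : x.tail.length ≤ x.length := by cases x <;> simp
      omega

theorem pvTailsSum_lt (rows : List (List Char)) (h : rows.any (fun r => !r.isEmpty) = true) :
    ((rows.map List.tail).map List.length).sum < (rows.map List.length).sum := by
  induction rows with
  | nil => simp at h
  | cons r rs ih =>
      simp only [List.any_cons, Bool.or_eq_true] at h
      simp only [List.map_cons, List.sum_cons]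
      rcases h with h | h
      · cases r with
        | nil => simp at h
        | cons c cs =>
            have := pvTailsSum_le rs
            simp only [List.tail_cons, List.length_cons]
            omega
      · have := ih h
        have : r.tail.length ≤ r.length := by cases r <;> simp
        omega

-- the 'while any(rows):' loop of Source B
def pvTranspose (rows : List (List Char)) : List Char :=
  if hh : rows.any (fun r => !r.isEmpty) = true then
    rows.filterMap List.head? ++ pvTranspose (rows.map List.tail)
  else []
termination_by (rows.map List.length).sum
decreasing_by simpa using pvTailsSum_lt rows hh

def process_strings_alt (strings : List String) : String :=
  String.ofList (pvTranspose (strings.map (fun s => s.toList.reverse)))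

-- ===== PRECONDITION & SPEC =====
-- Pre_ excludes only the empty list, on which A's max() raises ValueError.
def Pre_process_strings (strings : List String) : Prop := strings ≠ []
instance (strings : List String) : Decidable (Pre_process_strings strings) := by
  unfold Pre_process_strings; infer_instance
def pvWitness_process_strings : List String := (["ab", "c"])

def Spec_process_strings (strings : List String) (out : String) : Prop := out = process_strings_alt strings
instance (strings : List String) (out : String) : Decidable (Spec_process_strings strings out) := by
  unfold Spec_process_strings; infer_instance

-- ===== CLAIM (what is proved, stated in full; the proofs are below) =====
def Claim_equal_process_strings : Prop := ∀ (strings : List String), Dom_process_strings strings → Pre_process_strings strings → Spec_process_strings strings (process_strings strings)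

-- ===== LEMMAS AND PROOFS =====

theorem flatMap_option_toList {α β : Type} (l : List α) (f : α → Option β) :
    l.flatMap (fun x => (f x).toList) = l.filterMap f := by
  induction l with
  | nil => simp
  | cons x xs ih => cases hx : f x <;> simp [hx, ih]

theorem colA_eq (strings : List String) (k : Nat) :
    (strings.flatMap (fun s =>
        if (s.toList.length : Int) ≥ (1 + (k : Int)) then
          (PySem.List.pyGet? s.toList (-(1 + (k : Int)))).toList
        else []))
      = (strings.map (fun s => s.toList.reverse)).filterMap (fun r => r[k]?) := by
  have key : ∀ s : String,
      (if (s.toList.length : Int) ≥ (1 + (k : Int)) then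
          (PySem.List.pyGet? s.toList (-(1 + (k : Int)))).toList
        else [])
      = (s.toList.reverse[k]?).toList := by
    intro s
    by_cases hk : k < s.toList.length
    · rw [if_pos (by omega)]
      have hcast : (-(1 + (k : Int))) = -(((k + 1 : Nat) : Int)) := by push_cast; ring
      have hidx : s.toList.length - (k + 1) = s.toList.length - 1 - k := by omega
      rw [hcast, PySem.List.pyGet?_neg_natCast (k := k + 1) (xs := s.toList) (by omega) (by omega),
        hidx, List.getElem?_reverse hk]
    · rw [if_neg (by omega)]
      rw [List.getElem?_eq_none (by rw [List.length_reverse]; omega)]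
      rfl
  calc strings.flatMap (fun s =>
        if (s.toList.length : Int) ≥ (1 + (k : Int)) then
          (PySem.List.pyGet? s.toList (-(1 + (k : Int)))).toList
        else [])
      = strings.flatMap (fun s => (s.toList.reverse[k]?).toList) := by
        apply List.flatMap_congr; intro s _; exact key s
    _ = strings.filterMap (fun s => s.toList.reverse[k]?) :=
        flatMap_option_toList strings _
    _ = (strings.map (fun s => s.toList.reverse)).filterMap (fun r => r[k]?) := by
        rw [List.filterMap_map]; rfl

theorem transpose_eq (N : Nat) (rows : List (List Char)) (h : ∀ r ∈ rows, r.length ≤ N) :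
    pvTranspose rows = (List.range N).flatMap (fun k => rows.filterMap (fun r => r[k]?)) := by
  induction N generalizing rows with
  | zero =>
      rw [pvTranspose]
      have hall : rows.any (fun r => !r.isEmpty) = false := by
        simp only [List.any_eq_false]
        intro r hr
        have := h r hr
        cases r <;> simp_all
      simp [hall]
  | succ n ih =>
      rw [pvTranspose]
      by_cases hany : rows.any (fun r => !r.isEmpty) = true
      · simp only [hany, dif_pos]
        rw [List.range_succ_eq_map]
        simp only [List.flatMap_cons, List.flatMap_map]
        congr 1
        · apply List.filterMap_congr
          intro r _
          simp [List.head?_eq_getElem?]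
        · rw [ih (rows.map List.tail) (by
            intro r hr
            rcases List.mem_map.mp hr with ⟨t, ht, rfl⟩
            have := h t ht
            cases t <;> simp_all)]
          apply List.flatMap_congr
          intro k _
          rw [List.filterMap_map]
          apply List.filterMap_congr
          intro r _
          show r.tail[(k:Nat)]? = r[(k.succ:Nat)]?
          cases r <;> simp
      · simp only [hany]
        simp only [Bool.not_eq_true, List.any_eq_false] at hany
        have hall : ∀ r ∈ rows, r = [] := by
          intro r hr; have := hany r hr; cases r <;> simp_all
        have : ∀ k : Nat, rows.filterMap (fun r => r[k]?) = [] := by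
          intro k
          rw [List.filterMap_eq_nil_iff]
          intro r hr; rw [hall r hr]; simp
        simp [this]

-- ===== VERDICT (by name: the statement is the Claim_ definition above) =====
theorem foldl_append_body {α β : Type} (l : List α) (g : α → List β) (acc : List β) :
    l.foldl (fun acc x => acc ++ g x) acc = acc ++ l.flatMap g := by
  induction l generalizing acc with
  | nil => simp
  | cons x xs ih => simp [ih, List.append_assoc]

theorem process_strings_spec : Claim_equal_process_strings := by
  intro strings _ hpre
  unfold Spec_process_strings process_strings process_strings_alt
  have hne : strings.map (fun s => (s.toList.length : Int)) ≠ [] := by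
    simpa using hpre
  obtain ⟨m, hm⟩ : ∃ m, PySem.List.max? (strings.map (fun s => (s.toList.length : Int))) (fun x => x) = some m := by
    cases hmax : PySem.List.max? (strings.map (fun s => (s.toList.length : Int))) (fun x => x) with
    | none => exact absurd ((PySem.List.max?_eq_none_iff _ _).mp hmax) hne
    | some m => exact ⟨m, rfl⟩
  have hmem : m ∈ strings.map (fun s => (s.toList.length : Int)) := PySem.List.max?_mem hm
  have hmax : ∀ y ∈ strings.map (fun s => (s.toList.length : Int)), y ≤ m :=
    PySem.List.max?_isMax hm
  have hm0 : 0 ≤ m := by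
    rcases List.mem_map.mp hmem with ⟨s, _, rfl⟩
    positivity
  simp only [hm]
  congr 1
  -- rewrite the range [1 .. m] as a mapped List.range
  have hrange : PySem.List.pyRange 1 (m + 1) 1
      = (List.range m.toNat).map (fun (k : Nat) => (1 : Int) + (k : Int)) := by
    rw [PySem.List.pyRange_one]
    have h1 : (m + 1 - 1).toNat = m.toNat := by omega
    rw [h1]
  rw [hrange, List.foldl_map]
  -- inner loop: append the column for offset i
  have hinner : ∀ (i : Int) (acc : List Char),
      strings.foldl (fun result (s : String) =>
        if (s.toList.length : Int) ≥ i then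
          result ++ (PySem.List.pyGet? s.toList (-i)).toList
        else result) acc
      = acc ++ strings.flatMap (fun (s : String) =>
          if (s.toList.length : Int) ≥ i then
            (PySem.List.pyGet? s.toList (-i)).toList
          else []) := by
    intro i acc
    have hbody : (fun (result : List Char) (s : String) =>
        if (s.toList.length : Int) ≥ i then
          result ++ (PySem.List.pyGet? s.toList (-i)).toList
        else result)
      = (fun result (s : String) => result ++ (if (s.toList.length : Int) ≥ i then
          (PySem.List.pyGet? s.toList (-i)).toList else [])) := by
      funext result s; split <;> simp
    rw [hbody, foldl_append_body]
  simp only [hinner]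
  rw [foldl_append_body]
  simp only [List.nil_append]
  -- each column equals the transposed column, then close with transpose_eq
  rw [transpose_eq m.toNat (strings.map (fun s => s.toList.reverse)) (by
    intro r hr
    rcases List.mem_map.mp hr with ⟨t, ht, rfl⟩
    have := hmax _ (List.mem_map.mpr ⟨t, ht, rfl⟩)
    simp only [List.length_reverse]
    omega)]
  apply List.flatMap_congr
  intro k _
  exact colA_eq strings k
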